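-- pv_equiv track=rewrite | github.com/zjucsq/PLA | lib/genarate_predicate_pseudo_label.py | generate_video_list
-- ===== SOURCE A (Python) =====
-- def generate_video_list(frame_name_list):
--     video_dict = {}
--
--     for frame_name in frame_name_list:
--         video_name = frame_name[:5]
--         if video_name in video_dict.keys():
--             video_dict[video_name].append(frame_name)
--         else:
--             video_dict[video_name] = [frame_name]
--
--     return video_dict
-- ===== SOURCE B (Python) =====
-- def generate_video_list(frame_name_list):
--     prefixes = list(dict.fromkeys(f[:5] for f in frame_name_list))
--     return {p: [f for f in frame_name_list if f[:5] == p] for p in prefixes}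
-- ===== Notes on version B (the rewrite author's own statement) =====
-- stated objective: simpler
-- what changed: A builds the groups incrementally in one pass with a per-frame dict-membership branch choosing append vs fresh-list insert; B never appends: it first lists the distinct 5-char prefixes in first-occurrence order and then constructs each group wholesale with one filter comprehension over the whole input per prefix.
import Mathlib
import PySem

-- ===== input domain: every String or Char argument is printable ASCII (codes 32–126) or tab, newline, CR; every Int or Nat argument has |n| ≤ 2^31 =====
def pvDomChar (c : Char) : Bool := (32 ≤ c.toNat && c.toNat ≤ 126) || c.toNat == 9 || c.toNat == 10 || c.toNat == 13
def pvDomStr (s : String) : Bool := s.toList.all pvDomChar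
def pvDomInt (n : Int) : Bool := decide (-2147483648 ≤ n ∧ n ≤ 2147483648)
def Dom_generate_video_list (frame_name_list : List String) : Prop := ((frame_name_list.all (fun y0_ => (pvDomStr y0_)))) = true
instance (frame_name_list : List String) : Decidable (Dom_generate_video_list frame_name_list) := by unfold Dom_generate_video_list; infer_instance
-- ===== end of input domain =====

-- B replaces A's incremental single-pass dict build (membership branch, append vs fresh insert) by staged passes: list the distinct prefixes first, then build each group wholesale by filtering the input per prefix (objective: simpler; return value identical).

-- ===== PORT A =====
-- frame_name[:5]
def pvPrefix (frame_name : String) : String := PySem.Str.slice frame_name none (some 5)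

def generate_video_list (frame_name_list : List String) : List (String × List String) :=
  (frame_name_list.foldl (fun video_dict frame_name =>
      let video_name := pvPrefix frame_name
      if video_dict.contains video_name then
        video_dict.modify video_name [] (fun l => l ++ [frame_name])   -- video_dict[video_name].append(frame_name)
      else
        video_dict.insert video_name [frame_name]
    ) (PySem.Dict.empty : PySem.Dict String (List String))).items

-- ===== PORT B =====
def generate_video_list_alt (frame_name_list : List String) : List (String × List String) :=
  -- prefixes = list(dict.fromkeys(f[:5] for f in frame_name_list))
  let prefixes : List String := PySem.Set.ofList (frame_name_list.map pvPrefix)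
  -- {p: [f for f in frame_name_list if f[:5] == p] for p in prefixes}
  (prefixes.foldl (fun d p =>
      d.insert p (frame_name_list.filter (fun f => pvPrefix f == p)))
    (PySem.Dict.empty : PySem.Dict String (List String))).items

-- ===== PRECONDITION & SPEC =====
def Spec_generate_video_list (frame_name_list : List String) (out : List (String × List String)) : Prop := out = generate_video_list_alt frame_name_list
instance (frame_name_list : List String) (out : List (String × List String)) : Decidable (Spec_generate_video_list frame_name_list out) := by unfold Spec_generate_video_list; infer_instance

-- ===== CLAIM =====
def Claim_equal_generate_video_list : Prop := ∀ (frame_name_list : List String), Dom_generate_video_list frame_name_list → Spec_generate_video_list frame_name_list (generate_video_list frame_name_list)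

-- ===== LEMMAS AND PROOFS =====

-- inserting distinct fresh keys appends the pairs in order
theorem pvItems_foldl_insert (ks : List String) (v : String → List String)
    (d : PySem.Dict String (List String)) (hnd : ks.Nodup)
    (hfresh : ∀ p ∈ ks, d.contains p = false) :
    (ks.foldl (fun d p => d.insert p (v p)) d).items
      = d.items ++ ks.map (fun p => (p, v p)) := by
  induction ks generalizing d with
  | nil => simp
  | cons p t ih =>
    simp only [List.foldl_cons, List.map_cons]
    rw [ih _ hnd.of_cons (fun q hq => ?_),
      PySem.Dict.items_insert_of_not_contains _ _ (hfresh p (by simp))]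
    · simp
    · rw [PySem.Dict.contains_insert]
      have hqp : q ≠ p := fun h => (List.nodup_cons.mp hnd).1 (h ▸ hq)
      simp [hqp, hfresh q (List.mem_cons_of_mem _ hq)]

-- A's branch is exactly Python's d.modify (append with default [])
theorem pvStep_eq_modify (d : PySem.Dict String (List String)) (f : String) :
    (if d.contains (pvPrefix f) then d.modify (pvPrefix f) [] (fun l => l ++ [f])
     else d.insert (pvPrefix f) [f])
    = d.modify (pvPrefix f) [] (fun l => l ++ [f]) := by
  by_cases h : d.contains (pvPrefix f) = true
  · simp [h]
  · simp [eq_false_of_ne_true h, PySem.Dict.modify,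
      PySem.Dict.getD_of_not_contains d [] (eq_false_of_ne_true h)]

theorem pvFold_eq_modify (l : List String) :
    generate_video_list l
    = (l.foldl (fun d f => d.modify (pvPrefix f) [] (fun g => g ++ [f]))
        (PySem.Dict.empty : PySem.Dict String (List String))).items := by
  unfold generate_video_list
  congr 1
  exact PySem.List.foldl_congr_mem _ _ _ _ (fun d f _ => pvStep_eq_modify d f)

-- the A-side dict's lookup at any prefix is the filter of the input at that prefix
theorem pvGetD_from (l : List String) (d : PySem.Dict String (List String)) (c : String) :
    ((l.foldl (fun d f => d.modify (pvPrefix f) [] (fun g => g ++ [f])) d).getD c [])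
    = d.getD c [] ++ l.filter (fun f => pvPrefix f == c) := by
  have h := PySem.Dict.getD_foldl_modify_append
      (l := l.map (fun f => (pvPrefix f, f))) (d := d) (c := c)
  rw [List.foldl_map] at h
  rw [h]
  simp [List.filter_map, Function.comp_def]

-- A's result as a map over the distinct prefixes
theorem pvA_eq_map (l : List String) :
    generate_video_list l
    = (PySem.Set.ofList (l.map pvPrefix) : List String).map
        (fun p => (p, l.filter (fun f => pvPrefix f == p))) := by
  rw [pvFold_eq_modify]
  have hnd : ((l.foldl (fun d f => d.modify (pvPrefix f) [] (fun g => g ++ [f]))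
      (PySem.Dict.empty : PySem.Dict String (List String)))).keys.Nodup :=
    PySem.Dict.nodup_keys_foldl_modify_key l pvPrefix [] _ _ PySem.Dict.nodup_keys_empty
  rw [PySem.Dict.items_eq_map_keys _ hnd []]
  have hkeys : ((l.foldl (fun d f => d.modify (pvPrefix f) [] (fun g => g ++ [f]))
      (PySem.Dict.empty : PySem.Dict String (List String)))).keys
      = PySem.Set.ofList (l.map pvPrefix) := by
    rw [PySem.Dict.keys_foldl_modify_key l pvPrefix [] _ _, PySem.Dict.keys_empty]
    simp [PySem.Set.update, PySem.Set.ofList_eq_foldl]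
  rw [hkeys]
  apply List.map_congr_left
  intro p _
  rw [pvGetD_from l PySem.Dict.empty p, PySem.Dict.getD_empty]
  simp

-- B's result is the same map: the comprehension inserts distinct fresh keys, so items append in order
theorem pvB_eq_map (l : List String) :
    generate_video_list_alt l
    = (PySem.Set.ofList (l.map pvPrefix) : List String).map
        (fun p => (p, l.filter (fun f => pvPrefix f == p))) := by
  show ((PySem.Set.ofList (l.map pvPrefix) : List String).foldl
      (fun d p => d.insert p (l.filter (fun f => pvPrefix f == p)))
      (PySem.Dict.empty : PySem.Dict String (List String))).items = _
  rw [pvItems_foldl_insert _ _ _ (PySem.Set.nodup_ofList (l.map pvPrefix))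
      (fun p _ => PySem.Dict.contains_empty p)]
  simp [PySem.Dict.empty]

-- ===== VERDICT =====
theorem generate_video_list_spec : Claim_equal_generate_video_list := by
  intro l _
  unfold Spec_generate_video_list
  rw [pvA_eq_map, pvB_eq_map]
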